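-- pv_equiv track=rewrite | github.com/Nikoge/Statistics-and-Machine-Learning | Introduction to Python/Lab3/Group2_nahfa911_andst745/text_stats.py | all_success
-- ===== SOURCE A (Python) =====
-- def all_success(str):
--
--     # dictionery to store the successors
--     successors = {}
--
--     for i in range(1,len(str)):
--
--         if str[i-1] in successors.keys():
--             succs = successors[str[i-1]]
--             if str[i] in succs.keys():
--                 succs[str[i]] +=1
--             else:
--                 succs[str[i]] = 1
--         else:
--             successors[str[i-1]] = {}
--             succs = successors[str[i-1]]
--             if str[i] in succs.keys():
--                 succs[str[i]] +=1
--             else: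
--                 succs[str[i]] = 1
--
--     return (successors)
-- ===== SOURCE B (Python) =====
-- def all_success(str):
--     # Group by distinct predecessor characters (in first-appearance order),
--     # then count each one's successors in a dedicated counting pass.
--     pairs = list(zip(str, str[1:]))
--     successors = {}
--     for p in dict.fromkeys(q[0] for q in pairs):
--         counts = {}
--         for a, b in pairs:
--             if a == p:
--                 counts[b] = counts.get(b, 0) + 1
--         successors[p] = counts
--     return successors
-- ===== Notes on version B (the rewrite author's own statement) =====
-- stated objective: alternative
-- what changed: B first forms the adjacent-pair list zip(s, s[1:]), then iterates the distinct predecessor characters (dict.fromkeys) and counts each one's successors in a dedicated flat counting pass, instead of A's single index loop that branches on key presence and updates a nested dict in place.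
import Mathlib
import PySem

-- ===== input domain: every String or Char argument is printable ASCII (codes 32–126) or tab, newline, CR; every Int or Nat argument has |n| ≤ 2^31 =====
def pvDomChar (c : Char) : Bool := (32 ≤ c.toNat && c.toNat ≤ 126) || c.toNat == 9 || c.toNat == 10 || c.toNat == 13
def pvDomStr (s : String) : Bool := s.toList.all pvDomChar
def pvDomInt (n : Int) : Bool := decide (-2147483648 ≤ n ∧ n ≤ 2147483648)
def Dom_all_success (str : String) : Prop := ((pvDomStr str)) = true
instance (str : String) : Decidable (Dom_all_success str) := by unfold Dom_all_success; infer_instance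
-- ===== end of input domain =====

-- B groups by the distinct predecessor characters (dict.fromkeys) and counts each one's
-- successors in a dedicated pass, instead of A's single pass updating a nested dict in place.


-- ===== PORT A =====
-- Python's 1-character strings str[i] are represented as Char inside the loop and
-- rendered as String (Char.toString) in the returned association lists; the pyGetD
-- defaults are never used (1 ≤ i < len(str) keeps both indices in range).
def all_success (str : String) : List (String × List (String × Int)) :=
  let cs := str.toList
  let successors : PySem.Dict Char (PySem.Dict Char Int) :=
    (PySem.List.pyRange 1 (PySem.Str.len str) 1).foldl (fun d i =>
      let prev := PySem.List.pyGetD cs (i - 1) ' '   -- str[i-1]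
      let cur := PySem.List.pyGetD cs i ' '          -- str[i]
      if d.contains prev then
        let succs := d.getD prev PySem.Dict.empty
        let succs := if succs.contains cur then succs.insert cur (succs.getD cur 0 + 1)
                     else succs.insert cur 1
        d.insert prev succs
      else
        let d1 := d.insert prev PySem.Dict.empty
        let succs := d1.getD prev PySem.Dict.empty
        let succs := if succs.contains cur then succs.insert cur (succs.getD cur 0 + 1)
                     else succs.insert cur 1
        d1.insert prev succs) PySem.Dict.empty
  successors.items.map (fun kv => (kv.1.toString, kv.2.items.map (fun cv => (cv.1.toString, cv.2))))

-- ===== PORT B =====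
def all_success_alt (str : String) : List (String × List (String × Int)) :=
  let cs := str.toList
  let pairs := cs.zip (PySem.List.slice cs (some 1) none)          -- zip(str, str[1:])
  let successors : PySem.Dict Char (PySem.Dict Char Int) :=
    (PySem.List.dedup (pairs.map (·.1))).foldl (fun out p =>       -- dict.fromkeys(q[0] for q in pairs)
      out.insert p
        (pairs.foldl (fun counts q =>
          if q.1 == p then counts.insert q.2 (counts.getD q.2 0 + 1) else counts)
          PySem.Dict.empty)) PySem.Dict.empty
  successors.items.map (fun kv => (kv.1.toString, kv.2.items.map (fun cv => (cv.1.toString, cv.2))))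

-- ===== PRECONDITION & SPEC =====
def Spec_all_success (str : String) (out : List (String × List (String × Int))) : Prop := out = all_success_alt str
instance (str : String) (out : List (String × List (String × Int))) : Decidable (Spec_all_success str out) := by unfold Spec_all_success; infer_instance

-- ===== CLAIM (what is proved, stated in full; the proofs are below) =====
def Claim_equal_all_success : Prop := ∀ (str : String), Dom_all_success str → Spec_all_success str (all_success str)

-- ===== LEMMAS AND PROOFS =====

-- canonical single update "d[p][c] += 1 (default 0)"
def pvBump (d : PySem.Dict Char (PySem.Dict Char Int)) (x : Char × Char) :
    PySem.Dict Char (PySem.Dict Char Int) :=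
  d.insert x.1 ((d.getD x.1 PySem.Dict.empty).insert x.2 ((d.getD x.1 PySem.Dict.empty).getD x.2 0 + 1))

-- successor counter of p in the pair list l
def pvC (p : Char) (l : List (Char × Char)) : PySem.Dict Char Int :=
  PySem.Dict.counter ((l.filter (fun q => q.1 == p)).map (·.2))

-- A's branchy loop body is the canonical bump
lemma pvStepA_eq_bump (d : PySem.Dict Char (PySem.Dict Char Int)) (prev cur : Char) :
    (if d.contains prev then
      let succs := d.getD prev PySem.Dict.empty
      let succs := if succs.contains cur then succs.insert cur (succs.getD cur 0 + 1)
                   else succs.insert cur 1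
      d.insert prev succs
    else
      let d1 := d.insert prev PySem.Dict.empty
      let succs := d1.getD prev PySem.Dict.empty
      let succs := if succs.contains cur then succs.insert cur (succs.getD cur 0 + 1)
                   else succs.insert cur 1
      d1.insert prev succs) = pvBump d (prev, cur) := by
  unfold pvBump
  by_cases h : d.contains prev
  · simp only [h, if_true]
    by_cases h2 : (d.getD prev PySem.Dict.empty).contains cur
    · simp [h2]
    · simp [h2, PySem.Dict.getD_of_not_contains _ _ (by simpa using h2)]
  · simp only [h, Bool.false_eq_true, if_false]
    rw [PySem.Dict.getD_insert_self, PySem.Dict.insert_insert_self,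
        PySem.Dict.getD_of_not_contains d _ (by simpa using h)]
    by_cases h2 : (PySem.Dict.empty (κ := Char) (ν := Int)).contains cur
    · simp at h2
    · simp [h2]

-- the index loop over range(1, len) reads exactly the adjacent pairs
lemma pvMap_range_pairs (cs : List Char) :
    (PySem.List.pyRange 1 (cs.length : Int) 1).map
      (fun i => (PySem.List.pyGetD cs (i - 1) ' ', PySem.List.pyGetD cs i ' ')) = cs.zip cs.tail := by
  apply List.ext_getElem
  · simp [PySem.List.length_pyRange_one, List.length_zip]
  · intro k h1 h2
    have hk : k < cs.length - 1 := by
      simp [PySem.List.length_pyRange_one] at h1; omega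
    have hr : k < (PySem.List.pyRange 1 (cs.length : Int) 1).length := by
      simp [PySem.List.length_pyRange_one]; omega
    simp only [List.getElem_map, PySem.List.getElem_pyRange_one _ _ _ hr, List.getElem_zip,
      List.getElem_tail]
    have e1 : (1 : Int) + (k : Int) - 1 = (k : Int) := by ring
    have e2 : (1 : Int) + (k : Int) = ((k + 1 : Nat) : Int) := by push_cast; ring
    rw [e1, e2, PySem.List.pyGetD_natCast, PySem.List.pyGetD_natCast]
    simp [List.getD_eq_getElem?_getD, List.getElem?_eq_getElem (by omega : k < cs.length),
      List.getElem?_eq_getElem (by omega : k + 1 < cs.length)]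

lemma pvC_append_same (p : Char) (l : List (Char × Char)) (c : Char) :
    pvC p (l ++ [(p, c)]) = (pvC p l).insert c ((pvC p l).getD c 0 + 1) := by
  unfold pvC
  rw [List.filter_append]
  simp only [List.filter_cons, List.filter_nil]
  rw [if_pos (by simp)]
  rw [List.map_append]
  exact PySem.Dict.counter_append_singleton _ _

lemma pvC_append_other (p : Char) (l : List (Char × Char)) (x : Char × Char) (h : x.1 ≠ p) :
    pvC p (l ++ [x]) = pvC p l := by
  unfold pvC
  rw [List.filter_append]
  simp [h]

-- characterization of A's nested fold: outer keys are the distinct first components in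
-- first-appearance order, each mapped to the counter of its successors
lemma pvFoldl_bump_items (l : List (Char × Char)) :
    (l.foldl pvBump PySem.Dict.empty).items
      = (PySem.Set.ofList (l.map (·.1))).map (fun p => (p, pvC p l)) := by
  induction l using List.reverseRecOn with
  | nil => rfl
  | append_singleton l x ih =>
    obtain ⟨p₀, c₀⟩ := x
    rw [List.foldl_append, List.foldl_cons, List.foldl_nil]
    set N := l.foldl pvBump PySem.Dict.empty with hN
    have hkeys : N.keys = PySem.Set.ofList (l.map (·.1)) := by
      show N.items.map (·.1) = _
      rw [ih, List.map_map]
      simp [Function.comp_def]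
    have hnodup : N.keys.Nodup := by rw [hkeys]; exact PySem.Set.nodup_ofList _
    simp only [List.map_append, List.map_cons, List.map_nil]
    by_cases hp : p₀ ∈ l.map (·.1)
    · -- p₀ already a key
      have hpS : p₀ ∈ PySem.Set.ofList (l.map (·.1)) := (PySem.Set.mem_ofList _ _).mpr hp
      have hcont : N.contains p₀ = true := (PySem.Dict.contains_iff_mem_keys _ _).mpr (hkeys ▸ hpS)
      have hgetD : N.getD p₀ PySem.Dict.empty = pvC p₀ l := by
        apply PySem.Dict.getD_of_mem_items _ _ hnodup
        rw [ih]
        exact List.mem_map_of_mem hpS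
      show (pvBump N (p₀, c₀)).items = _
      unfold pvBump
      rw [PySem.Dict.items_insert_of_contains _ _ hcont, ih, List.map_map]
      rw [PySem.Set.ofList_append_singleton, PySem.Set.add_of_mem hpS]
      apply List.map_congr_left
      intro p hpmem
      by_cases hpp : p = p₀
      · subst hpp
        simp only [Function.comp_apply, beq_self_eq_true, if_true, hgetD]
        rw [pvC_append_same]
      · simp only [Function.comp_apply, beq_iff_eq, if_neg hpp]
        rw [pvC_append_other p l (p₀, c₀) (by simpa using Ne.symm hpp)]
    · -- p₀ fresh
      have hpS : p₀ ∉ PySem.Set.ofList (l.map (·.1)) := fun h => hp ((PySem.Set.mem_ofList _ _).mp h)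
      have hcont : N.contains p₀ = false := by
        rw [← Bool.not_eq_true]
        intro h
        exact hpS (hkeys ▸ (PySem.Dict.contains_iff_mem_keys _ _).mp h)
      have hgetD : N.getD p₀ PySem.Dict.empty = PySem.Dict.empty :=
        PySem.Dict.getD_of_not_contains _ _ hcont
      show (pvBump N (p₀, c₀)).items = _
      unfold pvBump
      rw [PySem.Dict.items_insert_of_not_contains _ _ hcont, ih]
      rw [PySem.Set.ofList_append_singleton, PySem.Set.add_of_not_mem hpS, List.map_append]
      congr 1
      · apply List.map_congr_left
        intro p hpmem
        have : p ≠ p₀ := fun h => hpS (h ▸ hpmem)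
        rw [pvC_append_other p l (p₀, c₀) (by simpa using Ne.symm this)]
      · simp only [List.map_cons, List.map_nil, hgetD]
        have hfilter : l.filter (fun q => q.1 == p₀) = [] := by
          rw [List.filter_eq_nil_iff]
          intro q hq
          simp only [beq_iff_eq]
          exact fun h => hp (h ▸ List.mem_map_of_mem hq)
        have : pvC p₀ (l ++ [(p₀, c₀)]) = PySem.Dict.empty.insert c₀ (PySem.Dict.empty.getD c₀ 0 + 1) := by
          rw [pvC_append_same, pvC]
          rw [hfilter]
          rfl
        rw [this]

-- A's index loop equals the canonical fold of pvBump over the adjacent pairs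
lemma pvAfold (cs : List Char) :
    (PySem.List.pyRange 1 (cs.length : Int) 1).foldl (fun d i =>
      let prev := PySem.List.pyGetD cs (i - 1) ' '
      let cur := PySem.List.pyGetD cs i ' '
      if d.contains prev then
        let succs := d.getD prev PySem.Dict.empty
        let succs := if succs.contains cur then succs.insert cur (succs.getD cur 0 + 1)
                     else succs.insert cur 1
        d.insert prev succs
      else
        let d1 := d.insert prev PySem.Dict.empty
        let succs := d1.getD prev PySem.Dict.empty
        let succs := if succs.contains cur then succs.insert cur (succs.getD cur 0 + 1)
                     else succs.insert cur 1
        d1.insert prev succs) PySem.Dict.empty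
    = (cs.zip cs.tail).foldl pvBump PySem.Dict.empty := by
  calc _ = (PySem.List.pyRange 1 (cs.length : Int) 1).foldl
            (fun d i => pvBump d (PySem.List.pyGetD cs (i - 1) ' ', PySem.List.pyGetD cs i ' '))
            PySem.Dict.empty := by
          exact PySem.List.foldl_congr_mem _ _ _ _ (fun acc x _ => pvStepA_eq_bump acc _ _)
    _ = _ := by rw [← pvMap_range_pairs cs, List.foldl_map]

-- B's outer loop builds the same items directly
lemma pvBfold_items (pairs : List (Char × Char)) :
    ((PySem.List.dedup (pairs.map (·.1))).foldl (fun out p =>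
      out.insert p (pairs.foldl (fun counts q =>
        if q.1 == p then counts.insert q.2 (counts.getD q.2 0 + 1) else counts)
        PySem.Dict.empty)) PySem.Dict.empty).items
    = (PySem.Set.ofList (pairs.map (·.1))).map (fun p => (p, pvC p pairs)) := by
  rw [PySem.List.dedup_eq_ofList]
  refine (PySem.Dict.items_foldl_insert_fresh (PySem.Set.ofList (pairs.map (·.1))) (fun p => p)
      (fun p => pairs.foldl (fun counts q =>
        if q.1 == p then counts.insert q.2 (counts.getD q.2 0 + 1) else counts)
        (PySem.Dict.empty : PySem.Dict Char Int))
      PySem.Dict.empty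
      (fun a _ => PySem.Dict.contains_empty a)
      (by simp)).trans ?_
  show [] ++ _ = _
  rw [List.nil_append]
  apply List.map_congr_left
  intro p _
  have hinner : pairs.foldl (fun counts q =>
      if q.1 == p then counts.insert q.2 (counts.getD q.2 0 + 1) else counts)
      PySem.Dict.empty = pvC p pairs := by
    rw [PySem.List.foldl_if_eq_foldl_filter (fun (q : Char × Char) => q.1 == p)
      (fun (counts : PySem.Dict Char Int) (q : Char × Char) => counts.insert q.2 (counts.getD q.2 0 + 1))]
    rw [← List.foldl_map (f := fun q : Char × Char => q.2)
      (g := fun (c : PySem.Dict Char Int) (b : Char) => c.insert b (c.getD b 0 + 1))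
      (l := List.filter (fun q => q.1 == p) pairs) (init := PySem.Dict.empty)]
    rw [PySem.Dict.foldl_insert_getD_add_one_eq_counter]
    rfl
  rw [hinner]

theorem pv_main (str : String) : all_success str = all_success_alt str := by
  have hslice : PySem.List.slice str.toList (some 1) none = str.toList.tail :=
    PySem.List.slice_from_one _
  have hlen : PySem.Str.len str = ((str.toList).length : Int) := by simp
  have hdict : (PySem.List.pyRange 1 (PySem.Str.len str) 1).foldl
      (fun (d : PySem.Dict Char (PySem.Dict Char Int)) (i : Int) =>
      let prev := PySem.List.pyGetD str.toList (i - 1) ' '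
      let cur := PySem.List.pyGetD str.toList i ' '
      if d.contains prev then
        let succs := d.getD prev PySem.Dict.empty
        let succs := if succs.contains cur then succs.insert cur (succs.getD cur 0 + 1)
                     else succs.insert cur 1
        d.insert prev succs
      else
        let d1 := d.insert prev PySem.Dict.empty
        let succs := d1.getD prev PySem.Dict.empty
        let succs := if succs.contains cur then succs.insert cur (succs.getD cur 0 + 1)
                     else succs.insert cur 1
        d1.insert prev succs) PySem.Dict.empty
      = (PySem.List.dedup ((str.toList.zip (PySem.List.slice str.toList (some 1) none)).map (·.1))).foldl
        (fun (out : PySem.Dict Char (PySem.Dict Char Int)) (p : Char) =>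
          out.insert p ((str.toList.zip (PySem.List.slice str.toList (some 1) none)).foldl
            (fun counts q =>
              if q.1 == p then counts.insert q.2 (counts.getD q.2 0 + 1) else counts)
            PySem.Dict.empty)) PySem.Dict.empty := by
    rw [hslice, hlen]
    apply PySem.Dict.ext
    exact (congrArg (fun d : PySem.Dict Char (PySem.Dict Char Int) => d.items)
        (pvAfold str.toList)).trans
      ((pvFoldl_bump_items _).trans (pvBfold_items _).symm)
  exact congrArg (fun d : PySem.Dict Char (PySem.Dict Char Int) =>
    d.items.map (fun kv => (kv.1.toString, kv.2.items.map (fun cv => (cv.1.toString, cv.2))))) hdict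

-- ===== VERDICT (by name: the statement is the Claim_ definition above) =====
theorem all_success_spec : Claim_equal_all_success := by
  intro str _
  unfold Spec_all_success
  exact pv_main str
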